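-- pv_equiv track=rewrite | github.com/gislobo/atlutdhistory | multiplemain.py | splitfullname
-- ===== SOURCE A (Python) =====
-- def splitfullname(fullname: str) -> tuple[str | None, str | None]:
--     if not fullname or not fullname.strip():
--         return None, None
--
--     # Normalize whitespace
--     tokens = fullname.strip().split()
--
--     # Single token
--     if len(tokens) == 1:
--         return tokens[0], None
--
--     # Common suffixes (case-insensitive, with punctuation ignored)
--     suffixes = {"jr", "sr", "ii", "iii", "iv", "v", "phd", "md", "esq"}
--     def norm(t: str) -> str:
--         return "".join(ch for ch in t.lower() if ch.isalnum())
--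
--     # Strip trailing suffixes
--     while len(tokens) > 1 and norm(tokens[-1]) in suffixes:
--         tokens.pop()
--
--     # If everything got stripped to one token
--     if len(tokens) == 1:
--         return tokens[0], None
--
--     # Surname particles that often belong with the last name
--     particles = {"da", "de", "del", "della", "der", "di", "dos", "du", "la", "le",
--                  "van", "von", "bin", "al", "ibn", "mac", "mc", "st", "st.", "ter"}
--
--     # Start with last token as core last name
--     lastParts = [tokens[-1]]
--
--     # Pull preceding particles into the last name
--     i = len(tokens) - 2
--     while i >= 1 and norm(tokens[i]) in particles:
--         lastParts.insert(0, tokens[i])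
--         i -= 1
--
--     firstname = tokens[0]
--     lastname = " ".join(lastParts) if lastParts else None
--
--     # If anything remains between first and lastParts, treat as middle names; attach to last name
--     if i >= 1:
--         middle = " ".join(tokens[1:i+1])
--         lastname = f"{middle} {lastname}" if lastname else middle
--
--     return firstname, lastname
-- ===== SOURCE B (Python) =====
-- def splitfullname(fullname: str) -> tuple[str | None, str | None]:
--     tokens = fullname.split()
--     if not tokens:
--         return None, None
--
--     suffixes = {"jr", "sr", "ii", "iii", "iv", "v", "phd", "md", "esq"}
--
--     def norm(t: str) -> str:
--         return "".join(ch for ch in t.lower() if ch.isalnum())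
--
--     # Find cut point: drop trailing suffix tokens, keeping at least one token.
--     k = len(tokens)
--     while k > 1 and norm(tokens[k - 1]) in suffixes:
--         k -= 1
--
--     if k == 1:
--         return tokens[0], None
--     # A's particle scan plus middle-name reattachment always rebuilds the
--     # whole tail, so the last name is simply the remaining tokens joined.
--     return tokens[0], " ".join(tokens[1:k])
-- ===== Notes on version B (the rewrite author's own statement) =====
-- stated objective: simpler
-- what changed: A's backward particle scan plus middle-name reattachment always reconstructs the whole post-suffix tail, so B drops that second loop and its list building entirely and returns tokens[0] with the remaining tokens joined, using a single index-decrementing suffix scan instead of A's list pops.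
import Mathlib
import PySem

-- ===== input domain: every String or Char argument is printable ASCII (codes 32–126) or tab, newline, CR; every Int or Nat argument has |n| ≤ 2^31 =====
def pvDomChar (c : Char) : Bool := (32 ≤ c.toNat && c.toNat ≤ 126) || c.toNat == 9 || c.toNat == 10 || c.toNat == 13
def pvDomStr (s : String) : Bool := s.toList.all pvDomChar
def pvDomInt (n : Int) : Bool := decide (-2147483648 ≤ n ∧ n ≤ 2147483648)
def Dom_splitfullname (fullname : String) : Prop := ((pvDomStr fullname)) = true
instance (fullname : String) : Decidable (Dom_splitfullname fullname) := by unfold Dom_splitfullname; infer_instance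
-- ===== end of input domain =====

-- B drops A's dead particle/middle-name reconstruction: after suffix stripping the last name
-- is simply the remaining tail joined, so B keeps one backward scan instead of A's two list-building loops (objective: simpler).


-- ===== shared helpers (identical in both Pythons) =====
-- norm(t) = "".join(ch for ch in t.lower() if ch.isalnum()); "".join of chars is String.ofList
def pvNorm (t : String) : String :=
  String.ofList ((PySem.Chars.lower t.toList).filter (fun ch => PySem.Chars.isalnum ch))

def pvSuffixes : PySem.Set String :=
  PySem.Set.ofList ["jr", "sr", "ii", "iii", "iv", "v", "phd", "md", "esq"]

def pvIsSuffix (t : String) : Bool := PySem.Set.contains pvSuffixes (pvNorm t)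

-- ===== PORT A =====
def pvParticles : PySem.Set String :=
  PySem.Set.ofList ["da", "de", "del", "della", "der", "di", "dos", "du", "la", "le",
                    "van", "von", "bin", "al", "ibn", "mac", "mc", "st", "st.", "ter"]

-- while len(tokens) > 1 and norm(tokens[-1]) in suffixes: tokens.pop()
def pvStripSuffixes (ts : List String) : List String :=
  match ts.getLast? with
  | none => ts
  | some last =>
    if h : 1 < ts.length ∧ pvIsSuffix last = true then pvStripSuffixes ts.dropLast
    else ts
termination_by ts.length
decreasing_by simp; omega

-- i = len(tokens)-2; while i >= 1 and norm(tokens[i]) in particles: lastParts.insert(0, tokens[i]); i -= 1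
def pvParticleLoop (ts : List String) (i : Int) (lp : List String) : Int × List String :=
  if h : 1 ≤ i then
    match PySem.List.pyGet? ts i with
    | some t =>
      if PySem.Set.contains pvParticles (pvNorm t) then
        pvParticleLoop ts (i - 1) (PySem.List.insert lp 0 t)
      else (i, lp)
    | none => (i, lp)  -- unreachable: whenever A's loop runs, 1 ≤ i < len(tokens)
  else (i, lp)
termination_by i.toNat
decreasing_by omega

def splitfullname (fullname : String) : Option String × Option String :=
  if fullname = "" ∨ PySem.Str.strip fullname = "" then (none, none)
  else
    let tokens := PySem.Str.split₀ (PySem.Str.strip fullname)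
    if tokens.length = 1 then (PySem.List.pyGet? tokens 0, none)
    else
      let ts := pvStripSuffixes tokens
      if ts.length = 1 then (PySem.List.pyGet? ts 0, none)
      else
        match PySem.List.pyGet? ts (-1) with
        | none => (none, none)  -- unreachable: ts is nonempty here
        | some last =>
          let r := pvParticleLoop ts ((ts.length : Int) - 2) [last]
          let firstname := PySem.List.pyGet? ts 0
          let lastname := if r.2.isEmpty then none else some (PySem.Str.join " " r.2)
          if 1 ≤ r.1 then
            let middle := PySem.Str.join " " (PySem.List.slice ts (some 1) (some (r.1 + 1)))
            (firstname, some (match lastname with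
              | some l => middle ++ " " ++ l
              | none => middle))
          else (firstname, lastname)

-- ===== PORT B =====
-- k = len(tokens); while k > 1 and norm(tokens[k-1]) in suffixes: k -= 1
def pvFindCut (tokens : List String) (k : Nat) : Nat :=
  if h : 1 < k then
    match PySem.List.pyGet? tokens ((k : Int) - 1) with
    | some t => if pvIsSuffix t then pvFindCut tokens (k - 1) else k
    | none => k  -- unreachable in B: k ≤ len(tokens) throughout
  else k
termination_by k

def splitfullname_alt (fullname : String) : Option String × Option String :=
  match PySem.Str.split₀ fullname with
  | [] => (none, none)
  | t0 :: rest =>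
    let k := pvFindCut (t0 :: rest) (t0 :: rest).length
    if k = 1 then (some t0, none)
    else (some t0, some (PySem.Str.join " " (PySem.List.slice (t0 :: rest) (some 1) (some (k : Int)))))

-- ===== PRECONDITION & SPEC =====
def Spec_splitfullname (fullname : String) (out : Option String × Option String) : Prop := out = splitfullname_alt fullname
instance (fullname : String) (out : Option String × Option String) : Decidable (Spec_splitfullname fullname out) := by unfold Spec_splitfullname; infer_instance

-- ===== CLAIM (what is proved, stated in full; the proofs are below) =====
def Claim_equal_splitfullname : Prop := ∀ (fullname : String), Dom_splitfullname fullname → Spec_splitfullname fullname (splitfullname fullname)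

-- ===== LEMMAS AND PROOFS =====

theorem pv_go_allspace (ws : List Char) (hws : ∀ c ∈ ws, PySem.Chars.isspace c = true) :
    ∀ cur acc, PySem.Chars.split₀.go ws cur acc = PySem.Chars.split₀.go [] cur acc := by
  induction ws with
  | nil => intro cur acc; rfl
  | cons c ws' ih =>
    intro cur acc
    have hc : PySem.Chars.isspace c = true := hws c (by simp)
    have hws' : ∀ c ∈ ws', PySem.Chars.isspace c = true := fun c hmem => hws c (by simp [hmem])
    by_cases hcur : cur.isEmpty
    · simp [PySem.Chars.split₀.go, hc, hcur, ih hws']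
    · simp [PySem.Chars.split₀.go, hc, hcur, ih hws']

theorem pv_go_append_space (cs ws : List Char) (hws : ∀ c ∈ ws, PySem.Chars.isspace c = true) :
    ∀ cur acc, PySem.Chars.split₀.go (cs ++ ws) cur acc = PySem.Chars.split₀.go cs cur acc := by
  induction cs with
  | nil => intro cur acc; simpa using pv_go_allspace ws hws cur acc
  | cons c cs' ih =>
    intro cur acc
    by_cases hc : PySem.Chars.isspace c
    · by_cases hcur : cur.isEmpty
      · simp [PySem.Chars.split₀.go, hc, hcur, ih]
      · simp [PySem.Chars.split₀.go, hc, hcur, ih]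
    · simp [PySem.Chars.split₀.go, hc, ih]

theorem pv_split₀_lstrip (cs : List Char) :
    PySem.Chars.split₀ (PySem.Chars.lstrip cs) = PySem.Chars.split₀ cs := by
  unfold PySem.Chars.split₀ PySem.Chars.lstrip
  induction cs with
  | nil => rfl
  | cons c cs' ih =>
    by_cases hc : PySem.Chars.isspace c
    · simpa [List.dropWhile_cons, hc, PySem.Chars.split₀.go] using ih
    · simp [List.dropWhile_cons, hc]

theorem pv_split₀_strip (cs : List Char) :
    PySem.Chars.split₀ (PySem.Chars.strip cs) = PySem.Chars.split₀ cs := by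
  unfold PySem.Chars.strip
  rw [← pv_split₀_lstrip cs]
  set ds := PySem.Chars.lstrip cs with hds
  have hdecomp : ds = PySem.Chars.rstrip ds ++ (List.takeWhile PySem.Chars.isspace ds.reverse).reverse := by
    unfold PySem.Chars.rstrip
    rw [← List.reverse_append, List.takeWhile_append_dropWhile, List.reverse_reverse]
  have hall : ∀ c ∈ (List.takeWhile PySem.Chars.isspace ds.reverse).reverse, PySem.Chars.isspace c = true := by
    intro c hmem
    exact List.mem_takeWhile_imp (by simpa using hmem)
  conv_rhs => rw [hdecomp]
  unfold PySem.Chars.split₀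
  exact (pv_go_append_space _ _ hall [] []).symm

theorem pv_str_split₀_strip (s : String) :
    PySem.Str.split₀ (PySem.Str.strip s) = PySem.Str.split₀ s := by
  unfold PySem.Str.split₀
  rw [show (PySem.Str.strip s).toList = PySem.Chars.strip s.toList from by simp [PySem.Str.strip], pv_split₀_strip]

theorem pvFindCut_le (ts : List String) (k : Nat) : pvFindCut ts k ≤ k := by
  induction k using Nat.strong_induction_on with
  | _ k ih =>
    rw [pvFindCut]
    split
    · rename_i h
      cases hg : PySem.List.pyGet? ts ((k : Int) - 1) with
      | none => simp
      | some t =>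
        simp only
        split
        · exact le_trans (ih (k-1) (by omega)) (by omega)
        · simp
    · simp

theorem pvFindCut_pos (ts : List String) (k : Nat) (h1 : 1 ≤ k) : 1 ≤ pvFindCut ts k := by
  induction k using Nat.strong_induction_on with
  | _ k ih =>
    rw [pvFindCut]
    split
    · rename_i h
      cases hg : PySem.List.pyGet? ts ((k : Int) - 1) with
      | none => simpa using h1
      | some t =>
        simp only
        split
        · exact ih (k-1) (by omega) (by omega)
        · exact h1
    · exact h1

theorem pvFindCut_take (ts : List String) (m k : Nat) (h : k ≤ m) :
    pvFindCut (ts.take m) k = pvFindCut ts k := by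
  induction k using Nat.strong_induction_on with
  | _ k ih =>
    rw [pvFindCut]; conv_rhs => rw [pvFindCut]
    by_cases h1 : 1 < k
    · rw [dif_pos h1, dif_pos h1]
      have hget : PySem.List.pyGet? (ts.take m) ((k : Int) - 1) = PySem.List.pyGet? ts ((k : Int) - 1) := by
        have hk1 : ((k : Int) - 1) = ((k - 1 : Nat) : Int) := by omega
        rw [hk1, PySem.List.pyGet?_natCast, PySem.List.pyGet?_natCast]
        rw [List.getElem?_take_of_lt (by omega)]
      rw [hget]
      cases hg : PySem.List.pyGet? ts ((k : Int) - 1) with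
      | none => rfl
      | some t =>
        by_cases hs : pvIsSuffix t = true
        · simp only [if_pos hs]; exact ih (k-1) (by omega) (by omega)
        · simp only [if_neg hs]
    · rw [dif_neg h1, dif_neg h1]

theorem pv_pyGet_last (ts : List String) (h : ts ≠ []) :
    PySem.List.pyGet? ts ((ts.length : Int) - 1) = some (ts.getLast h) := by
  have hl : 0 < ts.length := List.length_pos_iff.mpr h
  have hk1 : ((ts.length : Int) - 1) = ((ts.length - 1 : Nat) : Int) := by omega
  rw [hk1, PySem.List.pyGet?_natCast, List.getLast_eq_getElem,
    List.getElem?_eq_getElem (by omega)]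

theorem pvStripSuffixes_eq (ts : List String) :
    pvStripSuffixes ts = ts.take (pvFindCut ts ts.length) := by
  induction ts using pvStripSuffixes.induct with
  | case1 ts hnone =>
    have : ts = [] := by cases ts <;> simp_all
    subst this; simp [pvStripSuffixes]
  | case2 ts last hsome hcond ih =>
    have hne : ts ≠ [] := by intro h; subst h; simp at hsome
    have hlast : last = ts.getLast hne := by
      rw [List.getLast?_eq_some_getLast hne] at hsome; exact (Option.some.inj hsome).symm
    rw [pvStripSuffixes, hsome]
    dsimp only
    rw [dif_pos hcond]
    rw [ih]
    conv_rhs => rw [pvFindCut]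
    rw [dif_pos hcond.1, pv_pyGet_last ts hne, ← hlast]
    dsimp only
    rw [if_pos hcond.2]
    have hdl : ts.dropLast = ts.take (ts.length - 1) := by
      rw [List.dropLast_eq_take]
    have hfc : pvFindCut ts.dropLast ts.dropLast.length = pvFindCut ts (ts.length - 1) := by
      rw [List.length_dropLast, hdl, pvFindCut_take ts (ts.length - 1) (ts.length - 1) le_rfl]
    rw [hfc, hdl, List.take_take]
    congr 1
    have := pvFindCut_le ts (ts.length - 1)
    omega
  | case3 ts last hsome hcond =>
    have hne : ts ≠ [] := by intro h; subst h; simp at hsome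
    have hlast : last = ts.getLast hne := by
      rw [List.getLast?_eq_some_getLast hne] at hsome; exact (Option.some.inj hsome).symm
    rw [pvStripSuffixes, hsome]
    dsimp only
    rw [dif_neg hcond]
    by_cases h1 : 1 < ts.length
    · have hns : ¬ pvIsSuffix last = true := fun hs => hcond ⟨h1, hs⟩
      conv_rhs => rw [pvFindCut]
      rw [dif_pos h1, pv_pyGet_last ts hne, ← hlast]
      dsimp only
      rw [if_neg hns, List.take_length]
    · conv_rhs => rw [pvFindCut]
      rw [dif_neg h1, List.take_of_length_le le_rfl]

theorem pv_chars_join_append (sep : List Char) (a b : List (List Char)) (ha : a ≠ []) (hb : b ≠ []) :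
    PySem.Chars.join sep (a ++ b) = PySem.Chars.join sep a ++ sep ++ PySem.Chars.join sep b := by
  induction a with
  | nil => exact absurd rfl ha
  | cons x xs ih =>
    cases xs with
    | nil =>
      cases b with
      | nil => exact absurd rfl hb
      | cons y t =>
        rw [List.singleton_append, PySem.Chars.join_cons_cons, PySem.Chars.join_singleton]
    | cons x2 t =>
      have : (x :: x2 :: t) ++ b = x :: ((x2 :: t) ++ b) := rfl
      rw [this, List.cons_append, PySem.Chars.join_cons_cons, PySem.Chars.join_cons_cons,
        ← List.cons_append, ih (by simp)]
      simp [List.append_assoc]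

theorem pv_join_append (a b : List String) (ha : a ≠ []) (hb : b ≠ []) :
    PySem.Str.join " " (a ++ b) = PySem.Str.join " " a ++ " " ++ PySem.Str.join " " b := by
  unfold PySem.Str.join
  rw [List.map_append, pv_chars_join_append _ _ _ (by simpa using ha) (by simpa using hb)]
  apply String.ext
  simp

def pvLastnameOf (ts : List String) (p : Int × List String) : Option String :=
  let lastname := if p.2.isEmpty then none else some (PySem.Str.join " " p.2)
  if 1 ≤ p.1 then
    let middle := PySem.Str.join " " (PySem.List.slice ts (some 1) (some (p.1 + 1)))
    some (match lastname with
      | some l => middle ++ " " ++ l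
      | none => middle)
  else lastname

theorem pvParticle_phase (ts : List String) :
    ∀ (j : Nat), j + 2 ≤ ts.length →
      pvLastnameOf ts (pvParticleLoop ts (j : Int) (ts.drop (j + 1))) =
        some (PySem.Str.join " " (ts.drop 1)) := by
  intro j
  induction j with
  | zero =>
    intro hlen
    rw [pvParticleLoop, dif_neg (by norm_num)]
    have hne : ts.drop 1 ≠ [] := by
      rw [ne_eq, List.drop_eq_nil_iff]; omega
    rw [pvLastnameOf]
    dsimp only
    rw [if_neg (show ¬ (ts.drop 1).isEmpty = true by rw [List.isEmpty_iff]; exact hne), if_neg (by norm_num)]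
  | succ j ih =>
    intro hlen
    rw [pvParticleLoop, dif_pos (by exact_mod_cast Nat.succ_le_succ (Nat.zero_le j))]
    have hj1 : j + 1 < ts.length := by omega
    rw [show ((j + 1 : Nat) : Int) = ((j + 1 : Nat) : Int) from rfl, PySem.List.pyGet?_natCast,
      List.getElem?_eq_getElem hj1]
    dsimp only
    by_cases hp : PySem.Set.contains pvParticles (pvNorm ts[j + 1]) = true
    · rw [if_pos hp, PySem.List.insert_zero]
      have hcast : ((j + 1 : Nat) : Int) - 1 = ((j : Nat) : Int) := by push_cast; ring
      have hcons : ts[j + 1] :: ts.drop (j + 1 + 1) = ts.drop (j + 1) := List.getElem_cons_drop ..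
      rw [hcast, hcons]
      exact ih (by omega)
    · rw [if_neg hp]
      have hne2 : ts.drop (j + 1 + 1) ≠ [] := by
        rw [ne_eq, List.drop_eq_nil_iff]; omega
      have h1le : (1 : Int) ≤ ((j + 1 : Nat) : Int) := by omega
      have hEmp : ¬ (ts.drop (j + 1 + 1)).isEmpty = true := by simp [hne2]
      rw [pvLastnameOf]
      dsimp only
      rw [if_pos h1le, if_neg hEmp]
      dsimp only
      have hcast2 : ((j + 1 : Nat) : Int) + 1 = ((j + 2 : Nat) : Int) := by push_cast; ring
      rw [hcast2,
        show PySem.List.slice ts (some 1) (some ((j + 2 : Nat) : Int)) = (ts.drop 1).take (j + 2 - 1) from by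
          exact_mod_cast PySem.List.slice_natCast ts 1 (j + 2)]
      have hsplit : ts.drop 1 = (ts.drop 1).take (j + 2 - 1) ++ ts.drop (j + 1 + 1) := by
        conv_lhs => rw [← List.take_append_drop (j + 2 - 1) (ts.drop 1)]
        rw [List.drop_drop, show 1 + (j + 2 - 1) = j + 1 + 1 from by omega]
      conv_rhs => rw [hsplit]
      rw [pv_join_append _ _ (by
        rw [ne_eq, List.take_eq_nil_iff]
        push_neg
        exact ⟨by omega, by rw [ne_eq, List.drop_eq_nil_iff]; omega⟩) hne2]

theorem pv_pyGet0 {α : Type} (x : α) (xs : List α) : PySem.List.pyGet? (x :: xs) 0 = some x := by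
  simp [PySem.List.pyGet?, PySem.List.pyIdx?]


theorem pyGet_neg_one (xs : List String) (h : xs ≠ []) : PySem.List.pyGet? xs (-1) = some (xs.getLast h) := by
  have hl : 0 < xs.length := List.length_pos_iff.mpr h
  simp only [PySem.List.pyGet?, PySem.List.pyIdx?]
  rw [if_neg (by omega), if_pos (by omega)]
  simp [List.getLast_eq_getElem, List.getElem?_eq_getElem (by omega)]

theorem pvStripSuffixes_nil : pvStripSuffixes [] = [] := by simp [pvStripSuffixes]

theorem pv_main (fullname : String) : splitfullname fullname = splitfullname_alt fullname := by
  unfold splitfullname splitfullname_alt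
  by_cases hg : fullname = "" ∨ PySem.Str.strip fullname = ""
  · rw [if_pos hg]
    have hstrip : PySem.Str.strip fullname = "" := by
      rcases hg with h | h
      · subst h; rfl
      · exact h
    have hsplit : PySem.Str.split₀ fullname = [] := by
      rw [← pv_str_split₀_strip fullname, hstrip]; rfl
    rw [hsplit]
  · rw [if_neg hg]
    rw [pv_str_split₀_strip fullname]
    cases htokens : PySem.Str.split₀ fullname with
    | nil =>
      dsimp only
      rw [if_neg (by simp)]
      rw [pvStripSuffixes_nil]
      rw [if_neg (by simp)]
      rfl
    | cons t0 rest =>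
      dsimp only
      cases rest with
      | nil =>
        rw [if_pos (show [t0].length = 1 by simp), pv_pyGet0]
        rw [show pvFindCut [t0] [t0].length = 1 from by rw [pvFindCut]; simp]
        rw [if_pos (show (1:Nat) = 1 from rfl)]
      | cons r1 rs =>
        set tokens := t0 :: r1 :: rs with htok
        have hlen2 : 2 ≤ tokens.length := by simp [htok]
        rw [if_neg (by simp [htok])]
        set k := pvFindCut tokens tokens.length with hkdef
        have hk1 : 1 ≤ k := pvFindCut_pos tokens tokens.length (by omega)
        have hk2 : k ≤ tokens.length := pvFindCut_le tokens tokens.length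
        have hts : pvStripSuffixes tokens = tokens.take k := pvStripSuffixes_eq tokens
        rw [hts]
        have htslen : (tokens.take k).length = k := by
          rw [List.length_take]; omega
        by_cases hk : k = 1
        · rw [if_pos (by rw [htslen, hk]), if_pos hk]
          have : tokens.take k = [t0] := by rw [hk, htok]; rfl
          rw [this, pv_pyGet0]
        · rw [if_neg (by rw [htslen]; exact hk), if_neg hk]
          have hkk : 2 ≤ k := by omega
          have hne : tokens.take k ≠ [] := by
            rw [ne_eq, ← List.length_eq_zero_iff, htslen]; omega
          rw [pyGet_neg_one (tokens.take k) hne]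
          dsimp only
          have hdrop : (tokens.take k).drop ((tokens.take k).length - 1)
              = [(tokens.take k).getLast hne] := List.drop_length_sub_one hne
          have hcast : ((tokens.take k).length : Int) - 2 = ((k - 2 : Nat) : Int) := by
            rw [htslen]; omega
          have harg : [(tokens.take k).getLast hne] = (tokens.take k).drop ((k - 2) + 1) := by
            rw [← hdrop, htslen]
            congr 1
            omega
          rw [hcast, harg]
          have hL := pvParticle_phase (tokens.take k) (k - 2) (by rw [htslen]; omega)
          rw [pvLastnameOf] at hL
          dsimp only at hL
          have hfirst : PySem.List.pyGet? (tokens.take k) 0 = some t0 := by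
            obtain ⟨k', hk'⟩ : ∃ k', k = k' + 1 := ⟨k - 1, by omega⟩
            rw [hk', htok, List.take_succ_cons, pv_pyGet0]
          have hsl : PySem.List.slice tokens (some 1) (some (k : Int))
              = (tokens.drop 1).take (k - 1) := by
            exact_mod_cast PySem.List.slice_natCast tokens 1 k
          have htail : (tokens.take k).drop 1 = (tokens.drop 1).take (k - 1) := by
            obtain ⟨k', hk'⟩ : ∃ k', k = k' + 1 := ⟨k - 1, by omega⟩
            rw [hk', htok, List.take_succ_cons]
            simp
          rw [htail] at hL
          by_cases hc : 1 ≤ (pvParticleLoop (tokens.take k) ((k - 2 : Nat) : Int)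
              ((tokens.take k).drop ((k - 2) + 1))).1
          · rw [if_pos hc] at hL ⊢
            rw [hfirst, hsl, hL]
          · rw [if_neg hc] at hL ⊢
            rw [hfirst, hsl, hL]

-- ===== VERDICT (by name: the statement is the Claim_ definition above) =====
theorem splitfullname_spec : Claim_equal_splitfullname := by
  intro fullname _hdom
  exact pv_main fullname
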